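-- pv_equiv track=rewrite | github.com/3127qy/Texas_2021_2 | basic/Stimulation.py | getTempAllCards
-- ===== SOURCE A (Python) =====
-- allCards = ['<0,0>','<0,1>','<0,2>','<0,3>','<0,4>','<0,5>','<0,6>','<0,7>','<0,8>','<0,9>','<0,10>','<0,11>','<0,12>',
--             '<1,0>','<1,1>','<1,2>','<1,3>','<1,4>','<1,5>','<1,6>','<1,7>','<1,8>','<1,9>','<1,10>','<1,11>','<1,12>',
--             '<2,0>','<2,1>','<2,2>','<2,3>','<2,4>','<2,5>','<2,6>','<2,7>','<2,8>','<2,9>','<2,10>','<2,11>','<2,12>',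
--             '<3,0>','<3,1>','<3,2>','<3,3>','<3,4>','<3,5>','<3,6>','<3,7>','<3,8>','<3,9>','<3,10>','<3,11>','<3,12>',]
--
-- def getTempAllCards(hand_cards=[],board_cards=[],opCards = None):
--
--     # 先将先讲所有牌存入零时变量
--     tempAllCards = allCards[0:]
--
--     # 再在所有牌中删去已知的牌
--     for i in hand_cards:
--         if i in tempAllCards:
--             tempAllCards.remove(i)
--
--     for i in board_cards:
--         if i in tempAllCards:
--             tempAllCards.remove(i)
--
--     if opCards is not None:
--         for i in opCards:
--             if i in tempAllCards:
--                 tempAllCards.remove(i)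
--
--     return tempAllCards
-- ===== SOURCE B (Python) =====
-- allCards = ['<0,0>','<0,1>','<0,2>','<0,3>','<0,4>','<0,5>','<0,6>','<0,7>','<0,8>','<0,9>','<0,10>','<0,11>','<0,12>',
--             '<1,0>','<1,1>','<1,2>','<1,3>','<1,4>','<1,5>','<1,6>','<1,7>','<1,8>','<1,9>','<1,10>','<1,11>','<1,12>',
--             '<2,0>','<2,1>','<2,2>','<2,3>','<2,4>','<2,5>','<2,6>','<2,7>','<2,8>','<2,9>','<2,10>','<2,11>','<2,12>',
--             '<3,0>','<3,1>','<3,2>','<3,3>','<3,4>','<3,5>','<3,6>','<3,7>','<3,8>','<3,9>','<3,10>','<3,11>','<3,12>',]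
--
-- def getTempAllCards(hand_cards=[], board_cards=[], opCards=None):
--     excluded = set(hand_cards) | set(board_cards)
--     if opCards is not None:
--         excluded |= set(opCards)
--     return [c for c in allCards if c not in excluded]
-- ===== Notes on version B (the rewrite author's own statement) =====
-- stated objective: simpler
-- what changed: Replaces the three membership-test-plus-remove loops over a mutable deck copy with one excluded set built from all known cards followed by a single filtering comprehension over allCards.
import Mathlib
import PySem

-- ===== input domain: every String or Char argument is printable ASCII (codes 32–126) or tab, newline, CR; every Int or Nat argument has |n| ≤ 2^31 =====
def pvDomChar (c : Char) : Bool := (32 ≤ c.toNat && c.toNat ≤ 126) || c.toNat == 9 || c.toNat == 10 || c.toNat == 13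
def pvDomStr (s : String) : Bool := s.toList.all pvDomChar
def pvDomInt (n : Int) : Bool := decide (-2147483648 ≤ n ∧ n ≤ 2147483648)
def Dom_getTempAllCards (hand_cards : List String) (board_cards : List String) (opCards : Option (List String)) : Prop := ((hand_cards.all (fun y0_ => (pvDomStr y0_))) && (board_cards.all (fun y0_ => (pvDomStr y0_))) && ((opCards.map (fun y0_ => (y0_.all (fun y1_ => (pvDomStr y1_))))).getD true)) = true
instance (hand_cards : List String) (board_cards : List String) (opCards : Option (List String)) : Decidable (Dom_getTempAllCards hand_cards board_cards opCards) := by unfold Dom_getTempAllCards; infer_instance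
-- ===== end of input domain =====

-- ===== PORT A =====
-- B replaces A's three remove-loops over a mutable deck copy with one excluded set and a single filter (objective: simpler).
def pvAllCards : List String := ["<0,0>","<0,1>","<0,2>","<0,3>","<0,4>","<0,5>","<0,6>","<0,7>","<0,8>","<0,9>","<0,10>","<0,11>","<0,12>","<1,0>","<1,1>","<1,2>","<1,3>","<1,4>","<1,5>","<1,6>","<1,7>","<1,8>","<1,9>","<1,10>","<1,11>","<1,12>","<2,0>","<2,1>","<2,2>","<2,3>","<2,4>","<2,5>","<2,6>","<2,7>","<2,8>","<2,9>","<2,10>","<2,11>","<2,12>","<3,0>","<3,1>","<3,2>","<3,3>","<3,4>","<3,5>","<3,6>","<3,7>","<3,8>","<3,9>","<3,10>","<3,11>","<3,12>"]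

-- one pass 'for i in cs: if i in temp: temp.remove(i)' (remove = delete first occurrence)
def pvRemoveAll (temp : List String) (cs : List String) : List String :=
  cs.foldl (fun acc i => if acc.contains i then acc.erase i else acc) temp

def getTempAllCards (hand_cards : List String) (board_cards : List String) (opCards : Option (List String)) : List String :=
  let tempAllCards := pvAllCards  -- allCards[0:] is a fresh copy
  let tempAllCards := pvRemoveAll tempAllCards hand_cards
  let tempAllCards := pvRemoveAll tempAllCards board_cards
  match opCards with
  | some cs => pvRemoveAll tempAllCards cs
  | none => tempAllCards

-- ===== PORT B =====
def getTempAllCards_alt (hand_cards : List String) (board_cards : List String) (opCards : Option (List String)) : List String :=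
  let excluded := PySem.Set.union (PySem.Set.ofList hand_cards) (PySem.Set.ofList board_cards)
  let excluded := match opCards with
    | some cs => PySem.Set.union excluded (PySem.Set.ofList cs)
    | none => excluded
  pvAllCards.filter (fun c => !(PySem.Set.contains excluded c))

-- ===== PRECONDITION & SPEC =====
def Spec_getTempAllCards (hand_cards : List String) (board_cards : List String) (opCards : Option (List String)) (out : List String) : Prop := out = getTempAllCards_alt hand_cards board_cards opCards
instance (hand_cards : List String) (board_cards : List String) (opCards : Option (List String)) (out : List String) : Decidable (Spec_getTempAllCards hand_cards board_cards opCards out) := by unfold Spec_getTempAllCards; infer_instance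

-- ===== CLAIM (what is proved, stated in full; the proofs are below) =====
def Claim_equal_getTempAllCards : Prop := ∀ (hand_cards : List String) (board_cards : List String) (opCards : Option (List String)), Dom_getTempAllCards hand_cards board_cards opCards → Spec_getTempAllCards hand_cards board_cards opCards (getTempAllCards hand_cards board_cards opCards)

-- ===== LEMMAS AND PROOFS =====

theorem pvRemoveAll_nodup_filter (cs : List String) :
    ∀ (xs : List String), xs.Nodup →
      pvRemoveAll xs cs = xs.filter (fun x => !(cs.contains x)) := by
  induction cs with
  | nil => intro xs _; simp [pvRemoveAll]
  | cons c cs ih =>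
    intro xs hnd
    have hstep : (if xs.contains c then xs.erase c else xs) = xs.filter (fun x => !(x == c)) := by
      split_ifs with h
      · exact List.Nodup.erase_eq_filter hnd c
      · have h' : c ∉ xs := by simpa using h
        refine (List.filter_eq_self.2 ?_).symm
        intro a ha
        simp only [Bool.not_eq_eq_eq_not, Bool.not_true, beq_eq_false_iff_ne, ne_eq]
        rintro rfl
        exact h' ha
    have hrw : pvRemoveAll xs (c :: cs) = pvRemoveAll (xs.filter (fun x => !(x == c))) cs := by
      show List.foldl _ (if xs.contains c = true then xs.erase c else xs) cs = _
      rw [hstep]; rfl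
    rw [hrw, ih _ (hnd.filter _), List.filter_filter]
    apply List.filter_congr
    intro x _
    simp only [List.contains_cons, Bool.not_or, Bool.and_comm]

theorem pvAllCards_nodup : pvAllCards.Nodup := by decide

theorem mem_excl (x : String) (h b : List String) :
    (PySem.Set.contains (PySem.Set.union (PySem.Set.ofList h) (PySem.Set.ofList b)) x)
      = (h.contains x || b.contains x) := by
  apply Bool.eq_iff_iff.mpr
  simp [PySem.Set.mem_union, PySem.Set.mem_ofList]

theorem mem_excl3 (x : String) (h b c : List String) :
    (PySem.Set.contains
      (PySem.Set.union (PySem.Set.union (PySem.Set.ofList h) (PySem.Set.ofList b)) (PySem.Set.ofList c)) x)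
      = (h.contains x || b.contains x || c.contains x) := by
  apply Bool.eq_iff_iff.mpr
  simp [PySem.Set.mem_union, PySem.Set.mem_ofList, or_assoc]

theorem getTempAllCards_eq (hand_cards board_cards : List String) (opCards : Option (List String)) :
    getTempAllCards hand_cards board_cards opCards = getTempAllCards_alt hand_cards board_cards opCards := by
  cases opCards with
  | none =>
    simp only [getTempAllCards, getTempAllCards_alt]
    rw [pvRemoveAll_nodup_filter hand_cards _ pvAllCards_nodup,
      pvRemoveAll_nodup_filter board_cards _ (pvAllCards_nodup.filter _), List.filter_filter]
    apply List.filter_congr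
    intro x _
    rw [mem_excl, Bool.not_or]
    generalize hand_cards.contains x = p
    generalize board_cards.contains x = q
    cases p <;> cases q <;> rfl
  | some cs =>
    simp only [getTempAllCards, getTempAllCards_alt]
    rw [pvRemoveAll_nodup_filter hand_cards _ pvAllCards_nodup,
      pvRemoveAll_nodup_filter board_cards _ (pvAllCards_nodup.filter _),
      pvRemoveAll_nodup_filter cs _ ((pvAllCards_nodup.filter _).filter _),
      List.filter_filter, List.filter_filter]
    apply List.filter_congr
    intro x _
    rw [mem_excl3, Bool.not_or, Bool.not_or]
    generalize hand_cards.contains x = p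
    generalize board_cards.contains x = q
    generalize cs.contains x = r
    cases p <;> cases q <;> cases r <;> rfl

-- ===== VERDICT (by name: the statement is the Claim_ definition above) =====
theorem getTempAllCards_spec : Claim_equal_getTempAllCards := by
  intro h b o _
  exact getTempAllCards_eq h b o
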